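-- pv_equiv track=rewrite | github.com/Hightness/tesina | kanglegram.py | crossings_on_node
-- ===== SOURCE A (Python) =====
-- def crossings_on_node(tau_orders, n):
--     if n not in tau_orders:
--         return 0
--     j = tau_orders.index(n)
--     crossings = 0
--     for i in range(len(tau_orders)):
--         if tau_orders[i] >= 0 and ((tau_orders[i] > n and i < j) or (tau_orders[i] < n and i > j)):
--             crossings += 1
--     return crossings
-- ===== SOURCE B (Python) =====
-- def crossings_on_node(tau_orders, n):
--     # One pass over the REVERSED list with a two-field state machine:
--     # c counts elements 0 <= x < n seen so far (to the right),
--     # s is None while no n has been seen to the right; when an n is reached s is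
--     # (re)set to c (so the LEFTMOST n wins), and afterwards each x >= 0 with x > n
--     # to its left increments s. No membership test, no .index, no slicing.
--     c = 0
--     s = None
--     for x in reversed(tau_orders):
--         if x == n:
--             s = c
--         elif s is not None and x >= 0 and x > n:
--             s += 1
--         if 0 <= x < n:
--             c += 1
--     return 0 if s is None else s
-- ===== Notes on version B (the rewrite author's own statement) =====
-- stated objective: alternative
-- what changed: Replaced A's membership test + .index lookup + indexed loop over range(len) with a single fold over the reversed list driving a two-field state machine (a suffix count and an Option that is None until an n is seen, reset at each n so the leftmost wins), so no index arithmetic, second traversal or guard is needed.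
import Mathlib
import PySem

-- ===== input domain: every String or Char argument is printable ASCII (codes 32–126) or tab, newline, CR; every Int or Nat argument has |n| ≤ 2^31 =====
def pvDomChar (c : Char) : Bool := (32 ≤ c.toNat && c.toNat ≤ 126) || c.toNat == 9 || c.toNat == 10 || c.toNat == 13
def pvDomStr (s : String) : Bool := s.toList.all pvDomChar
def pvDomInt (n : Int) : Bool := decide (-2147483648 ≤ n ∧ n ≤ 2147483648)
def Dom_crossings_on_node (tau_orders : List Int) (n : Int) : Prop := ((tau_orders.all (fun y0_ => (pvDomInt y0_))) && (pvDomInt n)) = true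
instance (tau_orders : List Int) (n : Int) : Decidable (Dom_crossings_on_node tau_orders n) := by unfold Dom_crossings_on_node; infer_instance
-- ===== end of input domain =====

-- B replaces A's membership test + index lookup + indexed loop with one fold over the
-- reversed list driving a (count, Option) state machine (alternative decomposition, same cost).

-- ===== PORT A =====
-- A: membership guard, j = first index of n, then one loop over i in range(len) counting
-- index-position crossings. The 'none' branch of the match is unreachable (guard ensures membership).
def crossings_on_node (tau_orders : List Int) (n : Int) : Int :=
  if ¬ tau_orders.contains n then 0
  else
    match PySem.List.index? tau_orders n with
    | none => 0
    | some j =>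
      (PySem.List.pyRange 0 (tau_orders.length : Int) 1).foldl
        (fun crossings i =>
          if 0 ≤ PySem.List.pyGetD tau_orders i 0 ∧
              ((n < PySem.List.pyGetD tau_orders i 0 ∧ i < (j : Int)) ∨
               (PySem.List.pyGetD tau_orders i 0 < n ∧ (j : Int) < i)) then
            crossings + 1
          else crossings) 0

-- ===== PORT B =====
-- B: one foldl over the reversed list; state = (c = count of 0 <= x < n seen so far,
-- s = none until an n is seen, reset to c at each n, bumped by x >= 0 and x > n thereafter).
def pvStep (n : Int) (st : Int × Option Int) (x : Int) : Int × Option Int :=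
  ( st.1 + (if 0 ≤ x ∧ x < n then 1 else 0),
    if x = n then some st.1
    else
      match st.2 with
      | none => none
      | some r => some (r + (if 0 ≤ x ∧ n < x then 1 else 0)) )

def crossings_on_node_alt (tau_orders : List Int) (n : Int) : Int :=
  ((tau_orders.reverse.foldl (pvStep n) ((0 : Int), (none : Option Int))).2).getD 0

-- ===== PRECONDITION & SPEC =====
def Spec_crossings_on_node (tau_orders : List Int) (n : Int) (out : Int) : Prop := out = crossings_on_node_alt tau_orders n
instance (tau_orders : List Int) (n : Int) (out : Int) : Decidable (Spec_crossings_on_node tau_orders n out) := by unfold Spec_crossings_on_node; infer_instance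

-- ===== CLAIM (what is proved, stated in full; the proofs are below) =====
def Claim_equal_crossings_on_node : Prop := ∀ (tau_orders : List Int) (n : Int), Dom_crossings_on_node tau_orders n → Spec_crossings_on_node tau_orders n (crossings_on_node tau_orders n)

-- ===== LEMMAS AND PROOFS =====

-- Proof-side recursive characterisation of B's state machine.
def pvAfter (n : Int) : List Int → Int
  | [] => 0
  | x :: rest => (if 0 ≤ x ∧ x < n then 1 else 0) + pvAfter n rest

def pvBefore (n : Int) : List Int → Option Int
  | [] => none
  | x :: rest =>
    if x = n then some (pvAfter n rest)
    else
      match pvBefore n rest with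
      | none => none
      | some r => some (r + (if 0 ≤ x ∧ n < x then 1 else 0))

-- B's fold over the reversed list computes exactly (pvAfter, pvBefore).
theorem pvRun_eq (n : Int) (xs : List Int) :
    xs.reverse.foldl (pvStep n) ((0 : Int), (none : Option Int))
      = (pvAfter n xs, pvBefore n xs) := by
  induction xs with
  | nil => simp [pvAfter, pvBefore]
  | cons x xs ih =>
    rw [List.reverse_cons, List.foldl_append, ih]
    simp only [List.foldl_cons, List.foldl_nil, pvStep, pvAfter, pvBefore, Prod.mk.injEq]
    constructor
    · by_cases h : 0 ≤ x ∧ x < n <;> simp [h] <;> ring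
    · trivial


-- A's single indexed loop equals the two directional counts on the prefix/suffix around j.
theorem pvLoopEq (xs : List Int) (n : Int) (j : Nat) (hjlt : j < xs.length) :
    (PySem.List.pyRange 0 (xs.length : Int) 1).foldl
      (fun crossings i =>
        if 0 ≤ PySem.List.pyGetD xs i 0 ∧
            ((n < PySem.List.pyGetD xs i 0 ∧ i < (j : Int)) ∨
             (PySem.List.pyGetD xs i 0 < n ∧ (j : Int) < i)) then crossings + 1 else crossings) 0 =
    ((xs.take j).countP (fun x => decide (0 ≤ x ∧ n < x)) : Int)
    + ((xs.drop (j+1)).countP (fun x => decide (0 ≤ x ∧ x < n)) : Int) := by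
  rw [PySem.List.pyRange_one_append 0 (j : Int) (xs.length : Int) (by positivity) (by exact_mod_cast hjlt.le),
      PySem.List.pyRange_one_cons (a := (j : Int)) (b := (xs.length : Int)) (by exact_mod_cast hjlt),
      List.foldl_append, List.foldl_cons]
  -- prefix loop = count on take j
  have hpre : (PySem.List.pyRange 0 (j : Int) 1).foldl
      (fun crossings i =>
        if 0 ≤ PySem.List.pyGetD xs i 0 ∧
            ((n < PySem.List.pyGetD xs i 0 ∧ i < (j : Int)) ∨
             (PySem.List.pyGetD xs i 0 < n ∧ (j : Int) < i)) then crossings + 1 else crossings) 0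
      = ((xs.take j).countP (fun x => decide (0 ≤ x ∧ n < x)) : Int) := by
    have hlen : ((xs.take j).length : Int) = (j : Int) := by
      simp [List.length_take, min_eq_left hjlt.le]
    rw [show PySem.List.pyRange 0 (j : Int) 1 = PySem.List.pyRange 0 ((xs.take j).length : Int) 1 by rw [hlen]]
    rw [PySem.List.foldl_congr_mem _ _
        (fun acc i => if 0 ≤ PySem.List.pyGetD (xs.take j) i 0 ∧ n < PySem.List.pyGetD (xs.take j) i 0
          then acc + 1 else acc) 0 ?_]
    · rw [PySem.List.foldl_pyRange_zero_pyGetD' (xs.take j) 0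
          (fun acc x => if 0 ≤ x ∧ n < x then acc + 1 else acc) 0,
        PySem.List.foldl_ite_add_one]
      simp
    · intro acc i hi
      rw [PySem.List.mem_pyRange_one, hlen] at hi
      have hij : i < (j : Int) := hi.2
      have hgd : PySem.List.pyGetD (xs.take j) i 0 = PySem.List.pyGetD xs i 0 := by
        rw [PySem.List.pyGetD_eq_getElem (xs.take j) 0 hi.1 (by rw [hlen]; exact hij),
            PySem.List.pyGetD_eq_getElem xs 0 hi.1 (by exact_mod_cast lt_of_lt_of_le hij (by exact_mod_cast hjlt.le))]
        rw [List.getElem_take]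
      have hnj : ¬ ((j : Int) < i) := by omega
      simp only [hgd, hij, and_true, hnj, and_false, or_false]
  rw [hpre]
  -- middle element i = j: condition false
  have hmid : ∀ acc : Int,
      (if 0 ≤ PySem.List.pyGetD xs (j : Int) 0 ∧
          ((n < PySem.List.pyGetD xs (j : Int) 0 ∧ (j : Int) < (j : Int)) ∨
           (PySem.List.pyGetD xs (j : Int) 0 < n ∧ (j : Int) < (j : Int))) then acc + 1 else acc) = acc := by
    intro acc; simp
  rw [hmid]
  -- suffix loop = count on drop (j+1)
  have hsuf : (PySem.List.pyRange ((j : Int) + 1) (xs.length : Int) 1).foldl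
      (fun crossings i =>
        if 0 ≤ PySem.List.pyGetD xs i 0 ∧
            ((n < PySem.List.pyGetD xs i 0 ∧ i < (j : Int)) ∨
             (PySem.List.pyGetD xs i 0 < n ∧ (j : Int) < i)) then crossings + 1 else crossings)
      ((xs.take j).countP (fun x => decide (0 ≤ x ∧ n < x)) : Int)
      = ((xs.take j).countP (fun x => decide (0 ≤ x ∧ n < x)) : Int)
        + ((xs.drop (j+1)).countP (fun x => decide (0 ≤ x ∧ x < n)) : Int) := by
    rw [PySem.List.foldl_congr_mem _ _
        (fun acc i => if 0 ≤ PySem.List.pyGetD xs i 0 ∧ PySem.List.pyGetD xs i 0 < n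
          then acc + 1 else acc) _ ?_]
    · rw [PySem.List.foldl_pyRange_pyGetD' xs 0
          (fun acc x => if 0 ≤ x ∧ x < n then acc + 1 else acc) _ (by positivity),
        PySem.List.foldl_ite_add_one]
      norm_num
    · intro acc i hi
      rw [PySem.List.mem_pyRange_one] at hi
      have hji : (j : Int) < i := by omega
      have : ¬ (i < (j : Int)) := by omega
      simp only [hji, and_true, this, and_false, false_or]
  rw [hsuf]

-- B's `after` phase counts 0 ≤ x < n over its list.
theorem pvAfter_eq (n : Int) (ys : List Int) :
    pvAfter n ys = (ys.countP (fun y => decide (0 ≤ y ∧ y < n)) : Int) := by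
  induction ys with
  | nil => simp [pvAfter]
  | cons y ys ih =>
    simp only [pvAfter, ih, List.countP_cons]
    by_cases h : 0 ≤ y ∧ y < n <;> simp [h] <;> omega

-- B's `before` phase yields none exactly when n is absent.
theorem pvBefore_none (n : Int) (xs : List Int) (h : n ∉ xs) : pvBefore n xs = none := by
  induction xs with
  | nil => rfl
  | cons x xs ih =>
    have hx : x ≠ n := by rintro rfl; exact h (List.mem_cons_self)
    have hxs : n ∉ xs := fun hm => h (List.mem_cons_of_mem _ hm)
    simp [pvBefore, hx, ih hxs]

-- B's `before` phase on a list whose first n sits at index j.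
theorem pvBefore_some (n : Int) (xs : List Int) (j : Nat)
    (h : PySem.List.index? xs n = some j) :
    pvBefore n xs = some (((xs.take j).countP (fun x => decide (0 ≤ x ∧ n < x)) : Int)
      + ((xs.drop (j+1)).countP (fun x => decide (0 ≤ x ∧ x < n)) : Int)) := by
  induction xs generalizing j with
  | nil => simp [PySem.List.index?] at h
  | cons x xs ih =>
    by_cases hx : x = n
    · subst hx
      rw [PySem.List.index?_cons_self] at h
      injection h with h
      subst h
      simp [pvBefore, pvAfter_eq]
    · rw [PySem.List.index?_cons_of_ne xs hx] at h
      obtain ⟨k, hk, rfl⟩ : ∃ k, PySem.List.index? xs n = some k ∧ k + 1 = j := by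
        cases hik : PySem.List.index? xs n with
        | none => rw [hik] at h; simp at h
        | some k => rw [hik] at h; exact ⟨k, rfl, by simpa using h⟩
      simp only [pvBefore, hx, if_false, ih k hk]
      have hklt : k < xs.length := (PySem.List.getElem_of_index?_eq_some hk).1
      simp only [List.take_succ_cons, List.drop_succ_cons, List.countP_cons]
      by_cases hc : 0 ≤ x ∧ n < x <;> simp [hc] <;> omega

-- ===== VERDICT (by name: the statement is the Claim_ definition above) =====
theorem crossings_on_node_spec : Claim_equal_crossings_on_node := by
  intro xs n _
  unfold Spec_crossings_on_node
  by_cases hm : xs.contains n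
  · obtain ⟨j, hj⟩ : ∃ j, PySem.List.index? xs n = some j := by
      have h := (PySem.List.index?_isSome_iff xs n).2 (by simpa using hm)
      exact Option.isSome_iff_exists.mp h
    obtain ⟨hjlt, -, -⟩ := PySem.List.getElem_of_index?_eq_some hj
    unfold crossings_on_node crossings_on_node_alt
    rw [pvRun_eq, pvBefore_some n xs j hj]
    simp only [hm, not_true_eq_false, if_false, hj, Option.getD_some]
    exact pvLoopEq xs n j hjlt
  · have hnot : n ∉ xs := by simpa using hm
    unfold crossings_on_node crossings_on_node_alt
    rw [pvRun_eq, pvBefore_none n xs hnot]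
    simp [hnot]
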